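-- pv_equiv track=rewrite | github.com/weselyj/Clarity-OMR-Train-RADIO | src/pipeline/assemble_score.py | _insert_ties
-- ===== SOURCE A (Python) =====
-- from typing import Dict, Iterable, List, Optional, Sequence, Tuple
--
-- def _is_inside_chord(tokens: List[str], idx: int) -> bool:
--     """Check if the token at idx is inside a <chord_start>...<chord_end> block."""
--     depth = 0
--     for i in range(idx):
--         if tokens[i] == "<chord_start>":
--             depth += 1
--         elif tokens[i] == "<chord_end>":
--             depth -= 1
--     return depth > 0
--
-- def _insert_ties(tokens: List[str]) -> List[str]:
--     """Insert tie_start/tie_end for same-pitch standalone notes across barlines.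
--
--     If a standalone note (not in a chord) at the end of a measure has the same
--     pitch as the first standalone note of the next measure, insert tie tokens.
--     """
--     result = list(tokens)
--
--     # Find all measure boundaries
--     measure_starts: List[int] = []
--     measure_ends: List[int] = []
--     for i, token in enumerate(result):
--         if token == "<measure_start>":
--             measure_starts.append(i)
--         elif token == "<measure_end>":
--             measure_ends.append(i)
--
--     if len(measure_starts) < 2 or len(measure_ends) < 2:
--         return result
--
--     insertions: List[Tuple[int, str]] = []
--     for m_idx in range(len(measure_ends) - 1):
--         m1_end = measure_ends[m_idx]
--         # Find last standalone note in measure 1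
--         last_note_idx = None
--         last_note_pitch = None
--         for j in range(m1_end - 1, -1, -1):
--             if result[j] == "<measure_start>":
--                 break
--             if result[j].startswith("note-") and not _is_inside_chord(result, j):
--                 last_note_idx = j
--                 last_note_pitch = result[j]
--                 break
--
--         if last_note_pitch is None:
--             continue
--
--         # Find next measure start
--         m2_start = None
--         for ms in measure_starts:
--             if ms > m1_end:
--                 m2_start = ms
--                 break
--         if m2_start is None:
--             continue
--
--         # Find first standalone note in measure 2
--         m2_end = None
--         for me in measure_ends:
--             if me > m2_start:
--                 m2_end = me
--                 break
--         if m2_end is None: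
--             m2_end = len(result)
--
--         first_note_idx = None
--         first_note_pitch = None
--         for j in range(m2_start + 1, m2_end):
--             if result[j].startswith("note-") and not _is_inside_chord(result, j):
--                 first_note_idx = j
--                 first_note_pitch = result[j]
--                 break
--
--         if first_note_pitch is None:
--             continue
--
--         # Same pitch across barline → insert tie
--         if last_note_pitch == first_note_pitch:
--             has_tie = False
--             for j in range(last_note_idx, m1_end):
--                 if result[j] == "tie_start":
--                     has_tie = True
--                     break
--             if not has_tie:
--                 insertions.append((last_note_idx, "tie_start"))
--                 insertions.append((first_note_idx, "tie_end"))
--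
--     # Apply insertions in reverse order to preserve indices
--     for pos, token in sorted(insertions, reverse=True):
--         result.insert(pos, token)
--
--     return result
-- ===== SOURCE B (Python) =====
-- from typing import List, Tuple
--
--
-- def _insert_ties(tokens: List[str]) -> List[str]:
--     """Array-based re-implementation: one forward scan precomputes chord-depth
--     based standalone-note flags, tie_start prefix counts and the measure
--     boundary lists; prefix/suffix nearest-index arrays answer every
--     per-measure search in O(1); the insertions are applied by one slice-based
--     merge instead of repeated list.insert."""
--     n = len(tokens)
--     result = list(tokens)
--
--     # scan 1: tie_start prefix counts, standalone-note flags, boundaries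
--     measure_starts: List[int] = []
--     measure_ends: List[int] = []
--     is_note: List[bool] = []
--     tie_pref: List[int] = [0]
--     depth = 0
--     for i, tok in enumerate(tokens):
--         tie_pref.append(tie_pref[-1] + (1 if tok == "tie_start" else 0))
--         is_note.append(tok.startswith("note-") and depth <= 0)
--         if tok == "<chord_start>":
--             depth += 1
--         elif tok == "<chord_end>":
--             depth -= 1
--         elif tok == "<measure_start>":
--             measure_starts.append(i)
--         elif tok == "<measure_end>":
--             measure_ends.append(i)
--
--     if len(measure_starts) < 2 or len(measure_ends) < 2:
--         return result
--
--     # scan 2: nearest previous measure_start / standalone note (strictly before i)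
--     prev_ms: List[int] = [-1]
--     last_note: List[int] = [-1]
--     for i, tok in enumerate(tokens):
--         prev_ms.append(i if tok == "<measure_start>" else prev_ms[-1])
--         last_note.append(i if is_note[i] else last_note[-1])
--
--     # scan 3 (backwards): nearest next measure_start / measure_end / note (>= i)
--     next_ms: List[int] = [n]
--     next_me: List[int] = [n]
--     next_note: List[int] = [n]
--     for i in range(n - 1, -1, -1):
--         next_ms.append(i if tokens[i] == "<measure_start>" else next_ms[-1])
--         next_me.append(i if tokens[i] == "<measure_end>" else next_me[-1])
--         next_note.append(i if is_note[i] else next_note[-1])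
--     next_ms.reverse()
--     next_me.reverse()
--     next_note.reverse()
--
--     insertions: List[Tuple[int, str]] = []
--     for m1_end in measure_ends[:-1]:
--         j = last_note[m1_end]
--         if j < 0 or j < prev_ms[m1_end]:
--             continue  # no standalone note, or a measure_start intervenes
--         m2_start = next_ms[m1_end + 1]
--         if m2_start >= n:
--             continue
--         m2_end = next_me[m2_start + 1]
--         k = next_note[m2_start + 1]
--         if k >= m2_end:
--             continue
--         if tokens[j] == tokens[k] and tie_pref[m1_end] == tie_pref[j]:
--             insertions.append((j, "tie_start"))
--             insertions.append((k, "tie_end"))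
--
--     # one slice-based merge instead of len(insertions) list.insert calls
--     out: List[str] = []
--     prev = 0
--     for pos, tok in sorted(insertions):
--         out += result[prev:pos]
--         out.append(tok)
--         prev = pos
--     out += result[prev:]
--     return out
-- ===== Notes on version B (the rewrite author's own statement) =====
-- stated objective: alternative
-- what changed: A rescans the prefix for chord depth inside every per-measure backward/forward note search, re-walks the boundary lists per measure and applies insertions by repeated list.insert; B precomputes standalone-note flags, tie_start prefix counts and prefix/suffix nearest-index arrays in three scans so every per-measure query is an O(1) array lookup, and applies the sorted insertions with a single slice-based merge.
import Mathlib
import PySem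

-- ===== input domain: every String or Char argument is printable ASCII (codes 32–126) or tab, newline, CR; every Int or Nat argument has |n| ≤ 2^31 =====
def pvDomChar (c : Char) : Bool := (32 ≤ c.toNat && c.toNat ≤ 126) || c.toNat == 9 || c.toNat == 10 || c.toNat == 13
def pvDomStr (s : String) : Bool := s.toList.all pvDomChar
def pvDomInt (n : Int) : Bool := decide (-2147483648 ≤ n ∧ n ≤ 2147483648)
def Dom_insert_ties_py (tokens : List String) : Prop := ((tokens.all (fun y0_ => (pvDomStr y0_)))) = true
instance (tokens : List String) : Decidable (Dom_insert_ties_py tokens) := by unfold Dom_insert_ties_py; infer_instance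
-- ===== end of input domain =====

-- B replaces A's per-measure rescans (each recounting chord depth over the whole prefix) by
-- precomputed prefix data and nearest-index arrays queried in O(1), and applies the collected
-- insertions with one slice-based merge instead of repeated list.insert.

-- ===== PORT A =====
-- _is_inside_chord: depth of <chord_start>/<chord_end> among tokens[0:idx]
def pvIsInsideChord (tokens : List String) (idx : Int) : Bool :=
  decide (0 < (PySem.List.pyRange 0 idx).foldl (fun depth i =>
    if PySem.List.pyGetD tokens i "" = "<chord_start>" then depth + 1
    else if PySem.List.pyGetD tokens i "" = "<chord_end>" then depth - 1
    else depth) (0 : Int))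

-- the backward 'for j in range(m1_end-1, -1, -1)' loop with its two breaks
def pvLastNoteScan (result : List String) : List Int → Option (Int × String)
  | [] => none
  | j :: rest =>
    if PySem.List.pyGetD result j "" = "<measure_start>" then none
    else if PySem.Str.startswith (PySem.List.pyGetD result j "") "note-"
            && !(pvIsInsideChord result j) then some (j, PySem.List.pyGetD result j "")
    else pvLastNoteScan result rest

-- the forward 'for j in range(m2_start+1, m2_end)' loop with its break
def pvFirstNoteScan (result : List String) : List Int → Option (Int × String)
  | [] => none
  | j :: rest =>
    if PySem.Str.startswith (PySem.List.pyGetD result j "") "note-"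
        && !(pvIsInsideChord result j) then some (j, PySem.List.pyGetD result j "")
    else pvFirstNoteScan result rest

def insert_ties_py (tokens : List String) : List String :=
  let result := tokens
  let bounds := (PySem.List.enumerate result).foldl
    (fun (acc : List Int × List Int) p =>
      if p.2 = "<measure_start>" then (acc.1 ++ [p.1], acc.2)
      else if p.2 = "<measure_end>" then (acc.1, acc.2 ++ [p.1])
      else acc) ([], [])
  let measure_starts := bounds.1
  let measure_ends := bounds.2
  if measure_starts.length < 2 ∨ measure_ends.length < 2 then result
  else
    let insertions := (PySem.List.pyRange 0 ((measure_ends.length : Int) - 1)).foldl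
      (fun (ins : List (Int × String)) m_idx =>
        let m1_end := PySem.List.pyGetD measure_ends m_idx 0
        match pvLastNoteScan result (PySem.List.pyRange (m1_end - 1) (-1) (-1)) with
        | none => ins
        | some (last_note_idx, last_note_pitch) =>
          match measure_starts.find? (fun ms => decide (m1_end < ms)) with
          | none => ins
          | some m2_start =>
            let m2_end := match measure_ends.find? (fun me => decide (m2_start < me)) with
              | none => PySem.List.len result
              | some me => me
            match pvFirstNoteScan result (PySem.List.pyRange (m2_start + 1) m2_end) with
            | none => ins
            | some (first_note_idx, first_note_pitch) =>
              if last_note_pitch = first_note_pitch then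
                if (PySem.List.pyRange last_note_idx m1_end).any
                    (fun j => PySem.List.pyGetD result j "" == "tie_start") then ins
                else ins ++ [(last_note_idx, "tie_start")] ++ [(first_note_idx, "tie_end")]
              else ins) []
    (PySem.List.sorted insertions (fun p => toLex p) true).foldl
      (fun res p => PySem.List.insert res p.1 p.2) result

-- ===== PORT B =====
def insert_ties_py_alt (tokens : List String) : List String :=
  let n := PySem.List.len tokens
  let result := tokens
  -- scan 1: tie_start prefix counts, standalone-note flags, measure boundaries
  let scan1 := (PySem.List.enumerate tokens).foldl
    (fun (st : (List Int × List Bool × List Int × List Int) × Int) p =>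
      let tie_pref := st.1.1 ++ [PySem.List.pyGetD st.1.1 (-1) 0 + (if p.2 = "tie_start" then 1 else 0)]
      let is_note := st.1.2.1 ++ [PySem.Str.startswith p.2 "note-" && decide (st.2 ≤ 0)]
      if p.2 = "<chord_start>" then ((tie_pref, is_note, st.1.2.2.1, st.1.2.2.2), st.2 + 1)
      else if p.2 = "<chord_end>" then ((tie_pref, is_note, st.1.2.2.1, st.1.2.2.2), st.2 - 1)
      else if p.2 = "<measure_start>" then ((tie_pref, is_note, st.1.2.2.1 ++ [p.1], st.1.2.2.2), st.2)
      else if p.2 = "<measure_end>" then ((tie_pref, is_note, st.1.2.2.1, st.1.2.2.2 ++ [p.1]), st.2)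
      else ((tie_pref, is_note, st.1.2.2.1, st.1.2.2.2), st.2))
    (([(0 : Int)], [], [], []), (0 : Int))
  let tie_pref := scan1.1.1
  let is_note := scan1.1.2.1
  let measure_starts := scan1.1.2.2.1
  let measure_ends := scan1.1.2.2.2
  if measure_starts.length < 2 ∨ measure_ends.length < 2 then result
  else
    -- scan 2: nearest previous measure_start / standalone note (strictly before i)
    let scan2 := (PySem.List.enumerate tokens).foldl
      (fun (st : List Int × List Int) p =>
        (st.1 ++ [if p.2 = "<measure_start>" then p.1 else PySem.List.pyGetD st.1 (-1) 0],
         st.2 ++ [if PySem.List.pyGetD is_note p.1 false then p.1 else PySem.List.pyGetD st.2 (-1) 0]))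
      ([-1], [-1])
    let prev_ms := scan2.1
    let last_note := scan2.2
    -- scan 3 (backwards): nearest next measure_start / measure_end / note (at or after i)
    let scan3 := (PySem.List.pyRange (n - 1) (-1) (-1)).foldl
      (fun (st : List Int × List Int × List Int) i =>
        (st.1 ++ [if PySem.List.pyGetD tokens i "" = "<measure_start>" then i else PySem.List.pyGetD st.1 (-1) 0],
         st.2.1 ++ [if PySem.List.pyGetD tokens i "" = "<measure_end>" then i else PySem.List.pyGetD st.2.1 (-1) 0],
         st.2.2 ++ [if PySem.List.pyGetD is_note i false then i else PySem.List.pyGetD st.2.2 (-1) 0]))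
      ([n], [n], [n])
    let next_ms := scan3.1.reverse
    let next_me := scan3.2.1.reverse
    let next_note := scan3.2.2.reverse
    let insertions := (PySem.List.slice measure_ends none (some (-1))).foldl
      (fun (ins : List (Int × String)) m1_end =>
        let j := PySem.List.pyGetD last_note m1_end 0
        if j < 0 ∨ j < PySem.List.pyGetD prev_ms m1_end 0 then ins
        else
          let m2_start := PySem.List.pyGetD next_ms (m1_end + 1) 0
          if n ≤ m2_start then ins
          else
            let m2_end := PySem.List.pyGetD next_me (m2_start + 1) 0
            let k := PySem.List.pyGetD next_note (m2_start + 1) 0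
            if m2_end ≤ k then ins
            else if PySem.List.pyGetD tokens j "" = PySem.List.pyGetD tokens k ""
                    ∧ PySem.List.pyGetD tie_pref m1_end 0 = PySem.List.pyGetD tie_pref j 0 then
              ins ++ [(j, "tie_start")] ++ [(k, "tie_end")]
            else ins) []
    -- one slice-based merge of the sorted insertions
    let st := (PySem.List.sorted insertions (fun p => toLex p) false).foldl
      (fun (st : List String × Int) p =>
        (st.1 ++ PySem.List.slice result (some st.2) (some p.1) ++ [p.2], p.1)) ([], 0)
    st.1 ++ PySem.List.slice result (some st.2) none

-- ===== PRECONDITION & SPEC =====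
def Spec_insert_ties_py (tokens : List String) (out : List String) : Prop := out = insert_ties_py_alt tokens
instance (tokens : List String) (out : List String) : Decidable (Spec_insert_ties_py tokens out) := by unfold Spec_insert_ties_py; infer_instance

-- ===== CLAIM (what is proved, stated in full; the proofs are below) =====
def Claim_equal_insert_ties_py : Prop := ∀ (tokens : List String), Dom_insert_ties_py tokens → Spec_insert_ties_py tokens (insert_ties_py tokens)

-- ===== LEMMAS AND PROOFS =====

-- spec layer: closed-form descriptions of what both programs compute
def pvW (t : String) : Int :=
  if t = "<chord_start>" then 1 else if t = "<chord_end>" then -1 else 0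

def pvDepth (ts : List String) (j : Nat) : Int := ((ts.take j).map pvW).sum

def pvNote (ts : List String) (j : Nat) : Bool :=
  PySem.Str.startswith (ts.getD j "") "note-" && decide (pvDepth ts j ≤ 0)

def pvMS (ts : List String) (j : Nat) : Bool := ts.getD j "" = "<measure_start>"
def pvME (ts : List String) (j : Nat) : Bool := ts.getD j "" = "<measure_end>"

def pvTP (ts : List String) (j : Nat) : Int := ((ts.take j).countP (· == "tie_start") : Int)

-- greatest i < e with p i, else -1
def pvLast (p : Nat → Bool) : Nat → Int
  | 0 => -1
  | (e+1) => if p e then (e : Int) else pvLast p e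

-- least i with a ≤ i < n and p i, else n
def pvNxt (p : Nat → Bool) (n : Nat) (i : Nat) : Nat :=
  if h : i < n then (if p i then i else pvNxt p n (i+1)) else n
  termination_by n - i
  decreasing_by omega

-- indices < n satisfying p, in order, as Ints
def pvIdx (p : Nat → Bool) (n : Nat) : List Int :=
  (List.range n).filterMap (fun i => if p i then some (i : Int) else none)


def pvIdxFrom (p : Nat → Bool) (n i : Nat) : List Int :=
  (List.range' i (n - i)).filterMap (fun k => if p k then some (k : Int) else none)

-- ---- small facts about the spec layer ----

theorem pvDepth_succ (ts : List String) (j : Nat) :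
    pvDepth ts (j+1) = pvDepth ts j + pvW (ts.getD j "") := by
  unfold pvDepth
  rw [List.take_add_one]
  rcases h : ts[j]? with _ | x
  · simp [List.getD, h, pvW]
  · simp [List.getD, h]

theorem pvTP_succ (ts : List String) (j : Nat) :
    pvTP ts (j+1) = pvTP ts j + (if ts.getD j "" = "tie_start" then 1 else 0) := by
  unfold pvTP
  rw [List.take_add_one]
  rcases h : ts[j]? with _ | x
  · simp [List.getD, h]
  · simp only [List.getD, h, Option.getD_some, Option.toList_some, List.countP_append,
      List.countP_cons, List.countP_nil]
    by_cases hx : x = "tie_start" <;> simp [hx]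

theorem pvTP_mono (ts : List String) (j e : Nat) (h : j ≤ e) : pvTP ts j ≤ pvTP ts e := by
  unfold pvTP
  have h1 : (ts.take e).take j = ts.take j := by rw [List.take_take]; congr 1; omega
  have h2 := (List.take_sublist j (ts.take e)).countP_le (p := (· == "tie_start"))
  rw [h1] at h2
  exact_mod_cast h2

theorem pvLast_lt (p : Nat → Bool) (e : Nat) : pvLast p e < (e : Int) := by
  induction e with
  | zero => simp [pvLast]
  | succ e ih =>
    simp only [pvLast]
    split
    · push_cast; omega
    · push_cast at *; omega

theorem pvLast_ge (p : Nat → Bool) (e : Nat) : -1 ≤ pvLast p e := by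
  induction e with
  | zero => simp [pvLast]
  | succ e ih =>
    simp only [pvLast]
    split
    · push_cast; omega
    · exact ih

theorem pvLast_spec (p : Nat → Bool) (e : Nat) (h : 0 ≤ pvLast p e) :
    p (pvLast p e).toNat = true := by
  induction e with
  | zero => simp [pvLast] at h
  | succ e ih =>
    rcases hp : p e with _ | _
    · simp only [pvLast, hp, Bool.false_eq_true, if_false] at *
      exact ih h
    · simp [pvLast, hp]

theorem pvNxt_step (p : Nat → Bool) {n i : Nat} (hin : i < n) :
    pvNxt p n i = if p i then i else pvNxt p n (i+1) := by
  rw [pvNxt]; simp [hin]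

theorem pvNxt_stop (p : Nat → Bool) {n i : Nat} (hin : ¬ i < n) : pvNxt p n i = n := by
  rw [pvNxt]; simp [hin]

theorem pvNxt_le (p : Nat → Bool) (n i : Nat) : pvNxt p n i ≤ n := by
  by_cases hin : i < n
  · rw [pvNxt_step p hin]
    split
    · omega
    · exact pvNxt_le p n (i+1)
  · rw [pvNxt_stop p hin]
  termination_by n - i
  decreasing_by omega

theorem pvNxt_ge (p : Nat → Bool) (n i : Nat) (h : i ≤ n) : i ≤ pvNxt p n i := by
  by_cases hin : i < n
  · rw [pvNxt_step p hin]
    split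
    · omega
    · have := pvNxt_ge p n (i+1) (by omega); omega
  · rw [pvNxt_stop p hin]; omega
  termination_by n - i
  decreasing_by omega

theorem pvNxt_congr (p q : Nat → Bool) (n i : Nat) (h : ∀ k, i ≤ k → k < n → p k = q k) :
    pvNxt p n i = pvNxt q n i := by
  by_cases hin : i < n
  · rw [pvNxt_step p hin, pvNxt_step q hin, h i (by omega) hin]
    split
    · rfl
    · exact pvNxt_congr p q n (i+1) (fun k hk hk' => h k (by omega) hk')
  · rw [pvNxt_stop p hin, pvNxt_stop q hin]
  termination_by n - i
  decreasing_by omega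

theorem pvNxt_skip (q : Nat → Bool) (n m i : Nat) (him : i ≤ m) (h : ∀ k, k < m → q k = false) :
    pvNxt q n i = pvNxt q n m := by
  rcases Nat.eq_or_lt_of_le him with rfl | hlt
  · rfl
  · by_cases hin : i < n
    · rw [pvNxt_step q hin, h i hlt]
      simp only [Bool.false_eq_true, if_false]
      exact pvNxt_skip q n m (i+1) (by omega) h
    · rw [pvNxt_stop q hin, pvNxt_stop q (by omega)]
  termination_by m - i
  decreasing_by omega

theorem pvNxt_restrict (p : Nat → Bool) {n b : Nat} (hbn : b ≤ n) (a : Nat) :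
    pvNxt p b a = if pvNxt p n a < b then pvNxt p n a else b := by
  by_cases hab : a < b
  · rw [pvNxt_step p hab, pvNxt_step p (show a < n by omega)]
    by_cases hp : p a = true
    · simp [hp, hab]
    · simp only [hp, Bool.false_eq_true, if_false]
      exact pvNxt_restrict p hbn (a+1)
  · rw [pvNxt_stop p hab]
    by_cases han : a < n
    · have := pvNxt_ge p n a (by omega)
      rw [if_neg (by omega)]
    · rw [pvNxt_stop p han, if_neg (by omega)]
  termination_by b - a
  decreasing_by omega

theorem pvIdx_succ (p q : Nat → Bool) (n : Nat) (h : ∀ i, i < n → p i = q i) :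
    pvIdx q (n+1) = pvIdx p n ++ (if q n then [(n : Int)] else []) := by
  unfold pvIdx
  rw [List.range_succ, List.filterMap_append]
  congr 1
  · refine List.filterMap_congr (fun i hi => ?_)
    rw [h i (List.mem_range.mp hi)]
  · simp only [List.filterMap]
    split <;> simp_all

theorem mem_pvIdx {p : Nat → Bool} {n : Nat} {x : Int} :
    x ∈ pvIdx p n ↔ ∃ i, i < n ∧ p i = true ∧ x = (i : Int) := by
  simp only [pvIdx, List.mem_filterMap, List.mem_range]
  constructor
  · rintro ⟨i, hi, hx⟩
    by_cases hp : p i = true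
    · rw [if_pos hp] at hx
      exact ⟨i, hi, hp, (Option.some_inj.mp hx).symm⟩
    · simp [hp] at hx
  · rintro ⟨i, hi, hp, rfl⟩
    exact ⟨i, hi, by simp [hp]⟩

theorem pvIdxFrom_zero (p : Nat → Bool) (n : Nat) : pvIdxFrom p n 0 = pvIdx p n := by
  unfold pvIdxFrom pvIdx
  rw [Nat.sub_zero, ← List.range_eq_range']

theorem find_pvIdxFrom (p : Nat → Bool) (n : Nat) (c : Int) : ∀ i,
    (pvIdxFrom p n i).find? (fun x => decide (c < x)) =
      (if pvNxt (fun j => p j && decide (c < (j : Int))) n i < n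
       then some ((pvNxt (fun j => p j && decide (c < (j : Int))) n i : Int)) else none) := by
  intro i
  by_cases hin : i < n
  · have hrec : n - i = (n - (i+1)) + 1 := by omega
    have htail : (List.range' (i+1) (n - (i+1))).filterMap
        (fun k => if p k then some (k : Int) else none) = pvIdxFrom p n (i+1) := rfl
    unfold pvIdxFrom
    rw [hrec, List.range'_succ, List.filterMap_cons]
    by_cases hp : p i = true
    · simp only [hp, if_true]
      by_cases hc : c < (i : Int)
      · have hnx : pvNxt (fun j => p j && decide (c < (j : Int))) n i = i := by
          rw [pvNxt_step _ hin]; simp [hp, hc]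
        rw [htail, List.find?_cons_of_pos (by simpa using hc), hnx, if_pos hin]
      · have hnx : pvNxt (fun j => p j && decide (c < (j : Int))) n i
            = pvNxt (fun j => p j && decide (c < (j : Int))) n (i+1) := by
          rw [pvNxt_step _ hin]; simp [hc]
        rw [htail, List.find?_cons_of_neg (by simpa using hc), hnx]
        exact find_pvIdxFrom p n c (i+1)
    · have hpb : p i = false := by simpa using hp
      have hnx : pvNxt (fun j => p j && decide (c < (j : Int))) n i
          = pvNxt (fun j => p j && decide (c < (j : Int))) n (i+1) := by
        rw [pvNxt_step _ hin]; simp [hpb]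
      simp only [hpb, Bool.false_eq_true, if_false]
      rw [htail, hnx]
      exact find_pvIdxFrom p n c (i+1)
  · have h0 : n - i = 0 := by omega
    unfold pvIdxFrom
    rw [h0]
    rw [pvNxt_stop _ hin]
    simp
  termination_by i => n - i
  decreasing_by all_goals omega

theorem A_findGt (p : Nat → Bool) (n : Nat) (c : Int) (hc : 0 ≤ c) :
    (pvIdx p n).find? (fun x => decide (c < x)) =
      (if pvNxt p n (c.toNat+1) < n then some ((pvNxt p n (c.toNat+1) : Int)) else none) := by
  rw [← pvIdxFrom_zero, find_pvIdxFrom]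
  have h1 : pvNxt (fun j => p j && decide (c < (j : Int))) n 0
      = pvNxt (fun j => p j && decide (c < (j : Int))) n (c.toNat+1) := by
    refine pvNxt_skip _ n (c.toNat+1) 0 (by omega) (fun k hk => ?_)
    have : ¬ c < (k : Int) := by omega
    simp [this]
  have h2 : pvNxt (fun j => p j && decide (c < (j : Int))) n (c.toNat+1) = pvNxt p n (c.toNat+1) := by
    refine pvNxt_congr _ _ n _ (fun k hk hk' => ?_)
    have : c < (k : Int) := by omega
    simp [this]
  rw [h1, h2]

-- ---- characterizing A's helpers ----

theorem A_depth (ts : List String) (j : Nat) :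
    (PySem.List.pyRange 0 (j:Int)).foldl (fun depth i =>
      if PySem.List.pyGetD ts i "" = "<chord_start>" then depth + 1
      else if PySem.List.pyGetD ts i "" = "<chord_end>" then depth - 1
      else depth) (0:Int) = pvDepth ts j := by
  induction j with
  | zero => rw [PySem.List.pyRange_one_eq_nil (by omega)]; rfl
  | succ j ih =>
    rw [show ((j+1 : Nat) : Int) = (j:Int) + 1 by push_cast; ring]
    rw [PySem.List.pyRange_one_succ_right (by omega), List.foldl_append, ih]
    simp only [List.foldl_cons, List.foldl_nil]
    rw [PySem.List.pyGetD_natCast, pvDepth_succ]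
    unfold pvW
    simp only [List.getD_eq_getElem?_getD]
    by_cases h1 : ts[j]?.getD "" = "<chord_start>"
    · simp [h1]
    · by_cases h2 : ts[j]?.getD "" = "<chord_end>" <;> simp [h1, h2] <;> omega

theorem A_inside (ts : List String) (j : Nat) :
    pvIsInsideChord ts (j : Int) = decide (0 < pvDepth ts j) := by
  unfold pvIsInsideChord; rw [A_depth]

theorem A_noteTest (ts : List String) (j : Nat) :
    (PySem.Str.startswith (PySem.List.pyGetD ts (j:Int) "") "note-" && !(pvIsInsideChord ts (j:Int)))
      = pvNote ts j := by
  rw [PySem.List.pyGetD_natCast, A_inside]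
  unfold pvNote
  congr 1
  by_cases h : 0 < pvDepth ts j
  · simp [h, show ¬ pvDepth ts j ≤ 0 by omega]
  · simp [h, show pvDepth ts j ≤ 0 by omega]

theorem A_lastScan (ts : List String) (e : Nat) :
    pvLastNoteScan ts (PySem.List.pyRange ((e:Int) - 1) (-1) (-1)) =
      (if pvLast (pvMS ts) e < pvLast (pvNote ts) e
       then some (pvLast (pvNote ts) e, ts.getD (pvLast (pvNote ts) e).toNat "")
       else none) := by
  induction e with
  | zero =>
    rw [PySem.List.pyRange_neg_one_eq_nil (by omega)]
    simp [pvLastNoteScan, pvLast]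
  | succ e ih =>
    rw [show ((e+1:Nat):Int) - 1 = (e:Int) from by push_cast; ring]
    rw [PySem.List.pyRange_neg_one_cons (by omega)]
    simp only [pvLastNoteScan]
    rw [A_noteTest]
    by_cases hms : PySem.List.pyGetD ts (e:Int) "" = "<measure_start>"
    · rw [if_pos hms]
      rw [PySem.List.pyGetD_natCast] at hms
      have hmsb : pvMS ts e = true := by
        unfold pvMS; rw [hms]; simp
      have hnb : pvNote ts e = false := by
        have hsw : PySem.Str.startswith "<measure_start>" "note-" = false := by decide
        unfold pvNote
        rw [hms, hsw]
        simp
      simp only [pvLast, hmsb, hnb, Bool.false_eq_true, if_false, if_true]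
      rw [if_neg]
      have := pvLast_lt (pvNote ts) e
      omega
    · rw [if_neg hms]
      rw [PySem.List.pyGetD_natCast] at hms
      have hmsb : pvMS ts e = false := by
        unfold pvMS
        simp only [List.getD_eq_getElem?_getD] at hms ⊢
        simp [hms]
      cases hnote : pvNote ts e with
      | true =>
        simp only [if_true]
        have hlt := pvLast_lt (pvMS ts) e
        simp only [pvLast, hmsb, hnote, Bool.false_eq_true, if_false, if_true]
        rw [if_pos (by omega)]
        rw [PySem.List.pyGetD_natCast]
        simp
      | false =>
        simp only [Bool.false_eq_true, if_false]
        rw [ih]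
        simp only [pvLast, hmsb, hnote, Bool.false_eq_true, if_false]

theorem A_firstScan (ts : List String) : ∀ (d a b : Nat), b - a ≤ d →
    pvFirstNoteScan ts (PySem.List.pyRange (a:Int) (b:Int)) =
      (if pvNxt (pvNote ts) b a < b
       then some ((pvNxt (pvNote ts) b a : Int), ts.getD (pvNxt (pvNote ts) b a) "")
       else none) := by
  intro d
  induction d with
  | zero =>
    intro a b h
    rw [PySem.List.pyRange_one_eq_nil (by exact_mod_cast by omega : (b:Int) ≤ (a:Int))]
    rw [pvNxt_stop _ (by omega)]
    simp [pvFirstNoteScan]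
  | succ d ih =>
    intro a b h
    by_cases hab : a < b
    · rw [PySem.List.pyRange_one_cons (by exact_mod_cast hab)]
      simp only [pvFirstNoteScan]
      rw [A_noteTest, pvNxt_step _ hab]
      cases hp : pvNote ts a with
      | true => simp [hp, hab]
      | false =>
        simp only [hp, Bool.false_eq_true, if_false]
        rw [show (a:Int) + 1 = ((a+1 : Nat) : Int) by push_cast; ring]
        exact ih (a+1) b (by omega)
    · rw [PySem.List.pyRange_one_eq_nil (by exact_mod_cast by omega : (b:Int) ≤ (a:Int))]
      rw [pvNxt_stop _ hab]
      simp [pvFirstNoteScan]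

theorem A_any (ts : List String) (j : Nat) : ∀ (e : Nat), j ≤ e →
    ((PySem.List.pyRange (j:Int) (e:Int)).any (fun t => PySem.List.pyGetD ts t "" == "tie_start"))
      = decide (¬ (pvTP ts e = pvTP ts j)) := by
  intro e
  induction e with
  | zero =>
    intro h
    have h0 : j = 0 := by omega
    subst h0
    rw [PySem.List.pyRange_one_eq_nil (by omega)]
    simp
  | succ e ih =>
    intro h
    rcases Nat.lt_or_ge j (e+1) with h' | h'
    · have hje : j ≤ e := by omega
      rw [show ((e+1:Nat):Int) = (e:Int) + 1 by push_cast; ring]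
      rw [PySem.List.pyRange_one_succ_right (by exact_mod_cast hje), List.any_append, ih hje]
      simp only [List.any_cons, List.any_nil, Bool.or_false]
      rw [PySem.List.pyGetD_natCast, pvTP_succ]
      have hmono := pvTP_mono ts j e hje
      simp only [List.getD_eq_getElem?_getD]
      by_cases hx : ts[e]?.getD "" = "tie_start"
      · have hne : ¬ (pvTP ts e + 1 = pvTP ts j) := by omega
        simp [hx, hne]
      · simp [hx]
    · have h0 : j = e + 1 := by omega
      subst h0
      rw [PySem.List.pyRange_one_eq_nil (by omega)]
      simp

theorem A_bounds : ∀ (u : List String),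
    (PySem.List.enumerate u).foldl
      (fun (acc : List Int × List Int) p =>
        if p.2 = "<measure_start>" then (acc.1 ++ [p.1], acc.2)
        else if p.2 = "<measure_end>" then (acc.1, acc.2 ++ [p.1])
        else acc) ([], [])
      = (pvIdx (pvMS u) u.length, pvIdx (pvME u) u.length) := by
  intro u
  induction u using List.reverseRecOn with
  | nil => simp [PySem.List.enumerate_nil, pvIdx]
  | append_singleton u x ih =>
    rw [PySem.List.enumerate_append, List.foldl_append, ih]
    have hgetD : ∀ i, i < u.length → (u ++ [x]).getD i "" = u.getD i "" := fun i hi => by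
      simp [List.getD, List.getElem?_append_left hi]
    have hlast : (u ++ [x]).getD u.length "" = x := by
      simp [List.getD]
    have hms : ∀ i, i < u.length → pvMS u i = pvMS (u ++ [x]) i := fun i hi => by
      unfold pvMS; rw [hgetD i hi]
    have hme : ∀ i, i < u.length → pvME u i = pvME (u ++ [x]) i := fun i hi => by
      unfold pvME; rw [hgetD i hi]
    simp only [PySem.List.enumerate_cons, PySem.List.enumerate_nil, zero_add,
      List.foldl_cons, List.foldl_nil, List.length_append, List.length_cons, List.length_nil]
    rw [pvIdx_succ (pvMS u) (pvMS (u ++ [x])) u.length hms,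
        pvIdx_succ (pvME u) (pvME (u ++ [x])) u.length hme]
    by_cases h1 : x = "<measure_start>"
    · subst h1
      have hv : pvMS (u ++ ["<measure_start>"]) u.length = true := by
        unfold pvMS; rw [hlast]; simp
      have hv2 : pvME (u ++ ["<measure_start>"]) u.length = false := by
        unfold pvME; rw [hlast]; simp
      simp [hv, hv2]
    · by_cases h2 : x = "<measure_end>"
      · subst h2
        have hv : pvMS (u ++ ["<measure_end>"]) u.length = false := by
          unfold pvMS; rw [hlast]; simp
        have hv2 : pvME (u ++ ["<measure_end>"]) u.length = true := by
          unfold pvME; rw [hlast]; simp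
        simp [h1, hv, hv2]
      · have hv : pvMS (u ++ [x]) u.length = false := by
          unfold pvMS; rw [hlast]; simp [h1]
        have hv2 : pvME (u ++ [x]) u.length = false := by
          unfold pvME; rw [hlast]; simp [h2]
        simp [h1, h2, hv, hv2]

-- ---- characterizing B's scans ----

theorem B_prev (t : Int × String → Prop) [DecidablePred t] (p : Nat → Bool) :
    ∀ (u : List String), (∀ i, i < u.length → decide (t ((i:Int), u.getD i "")) = p i) →
    (PySem.List.enumerate u).foldl
        (fun acc q => acc ++ [if t q then q.1 else PySem.List.pyGetD acc (-1) 0]) [(-1 : Int)]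
      = (List.range (u.length+1)).map (pvLast p) := by
  intro u
  induction u using List.reverseRecOn with
  | nil => intro _; simp [PySem.List.enumerate_nil, pvLast]
  | append_singleton u x ih =>
    intro h
    have hgetD : ∀ i, i < u.length → (u ++ [x]).getD i "" = u.getD i "" := fun i hi => by
      simp [List.getD, List.getElem?_append_left hi]
    have hu : ∀ i, i < u.length → decide (t ((i:Int), u.getD i "")) = p i := fun i hi => by
      rw [← hgetD i hi]; exact h i (by simp; omega)
    rw [PySem.List.enumerate_append, List.foldl_append, ih hu]
    have hx : decide (t ((u.length:Int), x)) = p u.length := by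
      have hh := h u.length (by simp)
      rw [show (u ++ [x]).getD u.length "" = x from by simp [List.getD]] at hh
      exact hh
    simp only [PySem.List.enumerate_cons, PySem.List.enumerate_nil, zero_add,
      List.foldl_cons, List.foldl_nil, List.length_append, List.length_cons, List.length_nil]
    rw [show PySem.List.pyGetD ((List.range (u.length+1)).map (pvLast p)) (-1) 0
          = pvLast p u.length from by
        rw [List.range_succ, List.map_append]
        exact PySem.List.pyGetD_neg_one_append_singleton _ _ _]
    rw [show u.length + 1 + 1 = (u.length + 1) + 1 from rfl, List.range_succ (n := u.length + 1),
        List.map_append]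
    by_cases ht : t ((u.length:Int), x)
    · rw [if_pos ht]
      have hp : p u.length = true := by rw [← hx]; simp [ht]
      simp [pvLast, hp]
    · rw [if_neg ht]
      have hp : p u.length = false := by rw [← hx]; simp [ht]
      simp [pvLast, hp]

theorem B_next (t : Int → Prop) [DecidablePred t] (p : Nat → Bool) (n : Nat)
    (h : ∀ i : Nat, i < n → decide (t (i:Int)) = p i) :
    ((PySem.List.pyRange ((n:Int) - 1) (-1) (-1)).foldl
       (fun acc i => acc ++ [if t i then i else PySem.List.pyGetD acc (-1) 0]) [(n:Int)]).reverse
      = (List.range (n+1)).map (fun k => (pvNxt p n k : Int)) := by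
  have aux : ∀ e : Nat, e ≤ n →
      (PySem.List.pyRange ((e:Int) - 1) (-1) (-1)).foldl
        (fun acc i => acc ++ [if t i then i else PySem.List.pyGetD acc (-1) 0])
        ((((List.range' e (n - e)).map (fun k => (pvNxt p n k : Int))) ++ [(n:Int)]).reverse)
      = (((List.range' 0 n).map (fun k => (pvNxt p n k : Int))) ++ [(n:Int)]).reverse := by
    intro e
    induction e with
    | zero => intro _; rw [PySem.List.pyRange_neg_one_eq_nil (by omega)]; simp
    | succ e ihe =>
      intro he
      rw [show ((e+1:Nat):Int) - 1 = (e:Int) from by push_cast; ring]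
      rw [PySem.List.pyRange_neg_one_cons (by omega), List.foldl_cons]
      have hlook : PySem.List.pyGetD
          ((((List.range' (e+1) (n - (e+1))).map (fun k => (pvNxt p n k : Int))) ++ [(n:Int)]).reverse) (-1) 0
          = (pvNxt p n (e+1) : Int) := by
        rcases hk : n - (e+1) with _ | m
        · have hen : e + 1 = n := by omega
          simp only [List.range'_zero, List.map_nil, List.nil_append]
          rw [show (([(n : Int)]).reverse) = [] ++ [(n:Int)] from by simp]
          rw [PySem.List.pyGetD_neg_one_append_singleton]
          rw [pvNxt_stop _ (by omega)]
        · rw [List.range'_succ, List.map_cons, List.cons_append, List.reverse_cons]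
          rw [PySem.List.pyGetD_neg_one_append_singleton]
      rw [hlook]
      have hte := h e (by omega)
      rw [show ((((List.range' (e+1) (n - (e+1))).map (fun k => (pvNxt p n k : Int))) ++ [(n:Int)]).reverse
            ++ [if t (e:Int) then (e:Int) else (pvNxt p n (e+1) : Int)])
          = (((List.range' e (n - e)).map (fun k => (pvNxt p n k : Int))) ++ [(n:Int)]).reverse from by
        rw [show n - e = (n - (e+1)) + 1 from by omega, List.range'_succ, List.map_cons,
            List.cons_append, List.reverse_cons]
        congr 1
        rw [pvNxt_step p (show e < n by omega)]
        by_cases ht : t (e:Int)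
        · have hpe : p e = true := by rw [← hte]; simp [ht]
          simp [ht, hpe]
        · have hpe : p e = false := by rw [← hte]; simp [ht]
          simp [ht, hpe]]
      exact ihe (by omega)
  have hinit : ([(n:Int)] : List Int)
      = (((List.range' n (n - n)).map (fun k => (pvNxt p n k : Int))) ++ [(n:Int)]).reverse := by
    simp
  rw [hinit, aux n (le_refl n), List.reverse_reverse]
  rw [← List.range_eq_range', List.range_succ, List.map_append]
  congr 1
  simp only [List.map_cons, List.map_nil]
  rw [pvNxt_stop p (by omega)]

theorem B_scan1 : ∀ (u : List String),
    (PySem.List.enumerate u).foldl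
      (fun (st : (List Int × List Bool × List Int × List Int) × Int) p =>
        let tie_pref := st.1.1 ++ [PySem.List.pyGetD st.1.1 (-1) 0 + (if p.2 = "tie_start" then 1 else 0)]
        let is_note := st.1.2.1 ++ [PySem.Str.startswith p.2 "note-" && decide (st.2 ≤ 0)]
        if p.2 = "<chord_start>" then ((tie_pref, is_note, st.1.2.2.1, st.1.2.2.2), st.2 + 1)
        else if p.2 = "<chord_end>" then ((tie_pref, is_note, st.1.2.2.1, st.1.2.2.2), st.2 - 1)
        else if p.2 = "<measure_start>" then ((tie_pref, is_note, st.1.2.2.1 ++ [p.1], st.1.2.2.2), st.2)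
        else if p.2 = "<measure_end>" then ((tie_pref, is_note, st.1.2.2.1, st.1.2.2.2 ++ [p.1]), st.2)
        else ((tie_pref, is_note, st.1.2.2.1, st.1.2.2.2), st.2))
      (([(0 : Int)], [], [], []), (0 : Int))
    = (((List.range (u.length+1)).map (pvTP u),
        (List.range u.length).map (pvNote u),
        pvIdx (pvMS u) u.length, pvIdx (pvME u) u.length), pvDepth u u.length) := by
  intro u
  induction u using List.reverseRecOn with
  | nil => rfl
  | append_singleton u x ih =>
    rw [PySem.List.enumerate_append, List.foldl_append, ih]
    simp only [PySem.List.enumerate_cons, PySem.List.enumerate_nil, zero_add,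
      List.foldl_cons, List.foldl_nil, List.length_append, List.length_cons, List.length_nil]
    have hlast : (u ++ [x]).getD u.length "" = x := by simp [List.getD]
    have hgetD : ∀ i, i < u.length → (u ++ [x]).getD i "" = u.getD i "" := fun i hi => by
      simp [List.getD, List.getElem?_append_left hi]
    have htake : ∀ j, j ≤ u.length → (u ++ [x]).take j = u.take j := fun j hj =>
      List.take_append_of_le_length hj
    have hTP : ∀ j, j ≤ u.length → pvTP (u ++ [x]) j = pvTP u j := fun j hj => by
      unfold pvTP; rw [htake j hj]
    have hD : ∀ j, j ≤ u.length → pvDepth (u ++ [x]) j = pvDepth u j := fun j hj => by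
      unfold pvDepth; rw [htake j hj]
    have hN : ∀ i, i < u.length → pvNote (u ++ [x]) i = pvNote u i := fun i hi => by
      unfold pvNote; rw [hgetD i hi, hD i (le_of_lt hi)]
    have hMS : ∀ i, i < u.length → pvMS u i = pvMS (u ++ [x]) i := fun i hi => by
      unfold pvMS; rw [hgetD i hi]
    have hME : ∀ i, i < u.length → pvME u i = pvME (u ++ [x]) i := fun i hi => by
      unfold pvME; rw [hgetD i hi]
    have hTPmap : (List.range ((u.length+1)+1)).map (pvTP (u ++ [x]))
        = (List.range (u.length+1)).map (pvTP u)
          ++ [pvTP u u.length + (if x = "tie_start" then 1 else 0)] := by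
      rw [List.range_succ, List.map_append]
      congr 1
      · exact List.map_congr_left (fun i hi => hTP i (by simp at hi; omega))
      · simp only [List.map_cons, List.map_nil]
        rw [pvTP_succ, hTP u.length (le_refl _), hlast]
    have hNmap : (List.range (u.length+1)).map (pvNote (u ++ [x]))
        = (List.range u.length).map (pvNote u)
          ++ [PySem.Str.startswith x "note-" && decide (pvDepth u u.length ≤ 0)] := by
      rw [List.range_succ, List.map_append]
      congr 1
      · exact List.map_congr_left (fun i hi => hN i (by simpa using hi))
      · simp only [List.map_cons, List.map_nil]
        unfold pvNote
        rw [hlast, hD u.length (le_refl _)]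
    have hMSidx : pvIdx (pvMS (u ++ [x])) (u.length+1)
        = pvIdx (pvMS u) u.length
          ++ (if pvMS (u ++ [x]) u.length then [(u.length : Int)] else []) :=
      pvIdx_succ _ _ _ hMS
    have hMEidx : pvIdx (pvME (u ++ [x])) (u.length+1)
        = pvIdx (pvME u) u.length
          ++ (if pvME (u ++ [x]) u.length then [(u.length : Int)] else []) :=
      pvIdx_succ _ _ _ hME
    have hDsucc : pvDepth (u ++ [x]) (u.length+1) = pvDepth u u.length + pvW x := by
      rw [pvDepth_succ, hD u.length (le_refl _), hlast]
    have hTPlook : PySem.List.pyGetD ((List.range (u.length+1)).map (pvTP u)) (-1) 0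
        = pvTP u u.length := by
      rw [List.range_succ, List.map_append]
      exact PySem.List.pyGetD_neg_one_append_singleton _ _ _
    rw [hTPmap, hNmap, hMSidx, hMEidx, hDsucc, hTPlook]
    by_cases h1 : x = "<chord_start>"
    · subst h1
      have hv : pvMS (u ++ ["<chord_start>"]) u.length = false := by
        unfold pvMS; rw [hlast]; simp
      have hv2 : pvME (u ++ ["<chord_start>"]) u.length = false := by
        unfold pvME; rw [hlast]; simp
      simp [hv, hv2, pvW]
    · by_cases h2 : x = "<chord_end>"
      · subst h2
        have hv : pvMS (u ++ ["<chord_end>"]) u.length = false := by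
          unfold pvMS; rw [hlast]; simp
        have hv2 : pvME (u ++ ["<chord_end>"]) u.length = false := by
          unfold pvME; rw [hlast]; simp
        simp [h1, hv, hv2, pvW]
        omega
      · by_cases h3 : x = "<measure_start>"
        · subst h3
          have hv : pvMS (u ++ ["<measure_start>"]) u.length = true := by
            unfold pvMS; rw [hlast]; simp
          have hv2 : pvME (u ++ ["<measure_start>"]) u.length = false := by
            unfold pvME; rw [hlast]; simp
          simp [h1, h2, hv, hv2, pvW]
        · by_cases h4 : x = "<measure_end>"
          · subst h4
            have hv : pvMS (u ++ ["<measure_end>"]) u.length = false := by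
              unfold pvMS; rw [hlast]; simp
            have hv2 : pvME (u ++ ["<measure_end>"]) u.length = true := by
              unfold pvME; rw [hlast]; simp
            simp [h1, h2, h3, hv, hv2, pvW]
          · have hv : pvMS (u ++ [x]) u.length = false := by
              unfold pvMS; rw [hlast]; simp [h3]
            have hv2 : pvME (u ++ [x]) u.length = false := by
              unfold pvME; rw [hlast]; simp [h4]
            have hw : pvW x = 0 := by unfold pvW; simp [h1, h2]
            simp [h1, h2, h3, h4, hv, hv2, hw]

-- ---- the final stage: reverse-order insertion = slice merge ----

theorem M_rev (ins : List (Int × String)) :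
    PySem.List.sorted ins (fun p => toLex p) true
      = (PySem.List.sorted ins (fun p => toLex p) false).reverse := by
  have hp1 : List.Pairwise (fun a b : Int × String => toLex b ≤ toLex a)
      (PySem.List.sorted ins (fun p => toLex p) true) :=
    PySem.List.sorted_pairwise_rev ins (fun p => toLex p)
  have hp2 : List.Pairwise (fun a b : Int × String => toLex b ≤ toLex a)
      ((PySem.List.sorted ins (fun p => toLex p) false).reverse) := by
    rw [List.pairwise_reverse]
    exact PySem.List.sorted_pairwise ins (fun p => toLex p)
  have hperm : (PySem.List.sorted ins (fun p => toLex p) true).Perm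
      ((PySem.List.sorted ins (fun p => toLex p) false).reverse) :=
    ((PySem.List.sorted_perm ins (fun p => toLex p) true).trans
      (PySem.List.sorted_perm ins (fun p => toLex p) false).symm).trans
      (List.reverse_perm _).symm
  exact List.eq_of_perm_of_sorted
    (fun a b _ _ h1 h2 => toLex.injective (le_antisymm h2 h1)) hp1 hp2 hperm

theorem M_insert (res : List String) (c : Int) (y : String) (h0 : 0 ≤ c)
    (h1 : c ≤ (res.length : Int)) :
    PySem.List.insert res c y = res.take c.toNat ++ y :: res.drop c.toNat := by
  have hc : c = ((c.toNat : Nat) : Int) := by omega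
  rw [hc, PySem.List.insert_natCast res c.toNat y (by omega), Int.toNat_natCast]

theorem M_sliceStable (res : List String) (c : Int) (y : String)
    (hcl : c ≤ (res.length : Int)) :
    ∀ a b : Int, 0 ≤ a → 0 ≤ b → a ≤ c → b ≤ c →
      PySem.List.slice (res.take c.toNat ++ y :: res.drop c.toNat) (some a) (some b)
        = PySem.List.slice res (some a) (some b) := by
  intro a b ha hb hac hbc
  rw [PySem.List.slice_toNat _ ha hb, PySem.List.slice_toNat _ ha hb]
  have hlen : (res.take c.toNat).length = c.toNat := by
    rw [List.length_take]; omega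
  rw [List.drop_append_of_le_length (by omega)]
  rw [List.take_append_of_le_length (by rw [List.length_drop]; omega)]
  rw [List.drop_take, List.take_take]
  congr 1
  omega

theorem M_aux (res res' : List String) (c : Int)
    (hsl : ∀ a b : Int, 0 ≤ a → 0 ≤ b → a ≤ c → b ≤ c →
      PySem.List.slice res' (some a) (some b) = PySem.List.slice res (some a) (some b)) :
    ∀ (u : List (Int × String)) (acc : List String) (prev : Int),
      (∀ p ∈ u, 0 ≤ p.1 ∧ p.1 ≤ c) → 0 ≤ prev → prev ≤ c →
      (u.foldl (fun (st : List String × Int) p =>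
          (st.1 ++ PySem.List.slice res' (some st.2) (some p.1) ++ [p.2], p.1)) (acc, prev)
        = u.foldl (fun (st : List String × Int) p =>
          (st.1 ++ PySem.List.slice res (some st.2) (some p.1) ++ [p.2], p.1)) (acc, prev))
      ∧ 0 ≤ (u.foldl (fun (st : List String × Int) p =>
          (st.1 ++ PySem.List.slice res (some st.2) (some p.1) ++ [p.2], p.1)) (acc, prev)).2
      ∧ (u.foldl (fun (st : List String × Int) p =>
          (st.1 ++ PySem.List.slice res (some st.2) (some p.1) ++ [p.2], p.1)) (acc, prev)).2 ≤ c := by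
  intro u
  induction u with
  | nil => intro acc prev hu h0 hc; exact ⟨rfl, h0, hc⟩
  | cons q u ih =>
    intro acc prev hu h0 hc
    simp only [List.foldl_cons]
    have hq := hu q (by simp)
    rw [hsl prev q.1 h0 hq.1 hc hq.2]
    exact ih _ q.1 (fun p hp => hu p (by simp [hp])) hq.1 hq.2

theorem M_merge : ∀ (s : List (Int × String)) (res : List String),
    List.Pairwise (fun a b : Int × String => toLex a ≤ toLex b) s →
    (∀ p ∈ s, 0 ≤ p.1 ∧ p.1 ≤ (res.length : Int)) →
    (s.reverse).foldl (fun r p => PySem.List.insert r p.1 p.2) res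
      = (s.foldl (fun (st : List String × Int) p =>
          (st.1 ++ PySem.List.slice res (some st.2) (some p.1) ++ [p.2], p.1)) ([], 0)).1
        ++ PySem.List.slice res
            (some ((s.foldl (fun (st : List String × Int) p =>
              (st.1 ++ PySem.List.slice res (some st.2) (some p.1) ++ [p.2], p.1)) ([], 0)).2)) none := by
  intro s
  induction s using List.reverseRecOn with
  | nil =>
    intro res _ _
    simp only [List.reverse_nil, List.foldl_nil]
    rw [PySem.List.slice_from _ (le_refl 0)]
    simp
  | append_singleton u q ih =>
    intro res hpair hb
    have hq := hb q (by simp)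
    have hu_le : ∀ p ∈ u, p.1 ≤ q.1 := by
      intro p hp
      have hle := (List.pairwise_append.mp hpair).2.2 p hp q (by simp)
      rcases Prod.Lex.toLex_le_toLex.mp hle with hlt | heq
      · omega
      · exact le_of_eq heq.1
    have hins : PySem.List.insert res q.1 q.2
        = res.take q.1.toNat ++ q.2 :: res.drop q.1.toNat := M_insert res q.1 q.2 hq.1 hq.2
    rw [List.reverse_append]
    simp only [List.reverse_singleton, List.singleton_append, List.foldl_cons]
    rw [hins]
    have hlen' : (res.length : Int)
        ≤ ((res.take q.1.toNat ++ q.2 :: res.drop q.1.toNat).length : Int) := by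
      simp only [List.length_append, List.length_take, List.length_cons, List.length_drop]
      push_cast
      omega
    rw [ih (res.take q.1.toNat ++ q.2 :: res.drop q.1.toNat) (List.pairwise_append.mp hpair).1
      (fun p hp => ⟨(hb p (by simp [hp])).1, le_trans (hb p (by simp [hp])).2 hlen'⟩)]
    obtain ⟨heq, h0, hcle⟩ := M_aux res (res.take q.1.toNat ++ q.2 :: res.drop q.1.toNat) q.1
      (M_sliceStable res q.1 q.2 hq.2) u [] 0
      (fun p hp => ⟨(hb p (by simp [hp])).1, hu_le p hp⟩) (le_refl 0) hq.1
    rw [heq]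
    rw [List.foldl_append]
    simp only [List.foldl_cons, List.foldl_nil]
    have hfin : PySem.List.slice (res.take q.1.toNat ++ q.2 :: res.drop q.1.toNat)
        (some ((u.foldl (fun (st : List String × Int) p =>
          (st.1 ++ PySem.List.slice res (some st.2) (some p.1) ++ [p.2], p.1)) ([], 0)).2)) none
        = PySem.List.slice res
            (some ((u.foldl (fun (st : List String × Int) p =>
              (st.1 ++ PySem.List.slice res (some st.2) (some p.1) ++ [p.2], p.1)) ([], 0)).2)) (some q.1)
          ++ q.2 :: PySem.List.slice res (some q.1) none := by
        set prev := (u.foldl (fun (st : List String × Int) p =>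
          (st.1 ++ PySem.List.slice res (some st.2) (some p.1) ++ [p.2], p.1)) ([], 0)).2 with hprev
        rw [PySem.List.slice_from _ h0, PySem.List.slice_from _ hq.1,
          PySem.List.slice_toNat _ h0 hq.1]
        rw [List.drop_append_of_le_length (by rw [List.length_take]; omega)]
        rw [List.drop_take]
    rw [hfin]
    simp [List.append_assoc]

theorem foldl_idx {β : Type} (L : List Int) (F : β → Int → β) (init : β) :
    (PySem.List.pyRange 0 ((L.length : Nat) : Int)).foldl
        (fun acc j => F acc (PySem.List.pyGetD L j 0)) init
      = L.foldl F init := by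
  have h := PySem.List.foldl_pyRange_pyGetD L 0 F init (a := 0) (le_refl 0)
  simpa [PySem.List.len_eq] using h

-- the common spec-level loop body both insertion loops compute
def pvBody (ts : List String) (ins : List (Int × String)) (e : Int) : List (Int × String) :=
  let n := ts.length
  let i := e.toNat
  let L := pvLast (pvNote ts) i
  let P := pvLast (pvMS ts) i
  if L < 0 ∨ L < P then ins
  else
    let m2 := pvNxt (pvMS ts) n (i+1)
    if n ≤ m2 then ins
    else
      let m2e := pvNxt (pvME ts) n (m2+1)
      let K := pvNxt (pvNote ts) n (m2+1)
      if m2e ≤ K then ins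
      else if ts.getD L.toNat "" = ts.getD K "" ∧ pvTP ts i = pvTP ts L.toNat then
        ins ++ [(L, "tie_start")] ++ [((K : Int), "tie_end")]
      else ins

theorem pvBody_bound (ts : List String) : ∀ (l : List Int) (acc : List (Int × String)),
    (∀ p ∈ acc, 0 ≤ p.1 ∧ p.1 ≤ (ts.length : Int)) →
    (∀ e ∈ l, 0 ≤ e ∧ e < (ts.length : Int)) →
    ∀ p ∈ l.foldl (pvBody ts) acc, 0 ≤ p.1 ∧ p.1 ≤ (ts.length : Int) := by
  intro l
  induction l with
  | nil => intro acc hacc _ p hp; exact hacc p hp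
  | cons e l ih =>
    intro acc hacc hl p hp
    simp only [List.foldl_cons] at hp
    refine ih _ ?_ (fun e' he' => hl e' (by simp [he'])) p hp
    intro q hq
    have he := hl e (by simp)
    simp only [pvBody] at hq
    by_cases h1 : pvLast (pvNote ts) e.toNat < 0
        ∨ pvLast (pvNote ts) e.toNat < pvLast (pvMS ts) e.toNat
    · rw [if_pos h1] at hq; exact hacc q hq
    · rw [if_neg h1] at hq
      by_cases h2 : ts.length ≤ pvNxt (pvMS ts) ts.length (e.toNat+1)
      · rw [if_pos h2] at hq; exact hacc q hq
      · rw [if_neg h2] at hq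
        by_cases h3 : pvNxt (pvME ts) ts.length (pvNxt (pvMS ts) ts.length (e.toNat+1) + 1)
            ≤ pvNxt (pvNote ts) ts.length (pvNxt (pvMS ts) ts.length (e.toNat+1) + 1)
        · rw [if_pos h3] at hq; exact hacc q hq
        · rw [if_neg h3] at hq
          by_cases h4 : ts.getD (pvLast (pvNote ts) e.toNat).toNat ""
                = ts.getD (pvNxt (pvNote ts) ts.length (pvNxt (pvMS ts) ts.length (e.toNat+1) + 1)) ""
              ∧ pvTP ts e.toNat = pvTP ts (pvLast (pvNote ts) e.toNat).toNat
          · rw [if_pos h4] at hq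
            simp only [List.append_assoc, List.mem_append, List.mem_singleton] at hq
            rcases hq with hq | hq | hq
            · exact hacc q hq
            · subst hq
              have hLlt := pvLast_lt (pvNote ts) e.toNat
              have hcast : ((e.toNat : Nat) : Int) = e := by omega
              constructor
              · simp; omega
              · simp; omega
            · subst hq
              have hKle := pvNxt_le (pvNote ts) ts.length
                (pvNxt (pvMS ts) ts.length (e.toNat+1) + 1)
              constructor
              · simp
              · simp; omega
          · rw [if_neg h4] at hq; exact hacc q hq

theorem bodyA_pv (ts : List String) (acc : List (Int × String)) (i : Nat) (hin : i < ts.length) :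
    (match pvLastNoteScan ts (PySem.List.pyRange ((i:Int) - 1) (-1) (-1)) with
     | none => acc
     | some (last_note_idx, last_note_pitch) =>
       match List.find? (fun ms => decide ((i:Int) < ms)) (pvIdx (pvMS ts) ts.length) with
       | none => acc
       | some m2_start =>
         match pvFirstNoteScan ts (PySem.List.pyRange (m2_start + 1)
             (match List.find? (fun me => decide (m2_start < me)) (pvIdx (pvME ts) ts.length) with
              | none => ((ts.length : Nat) : Int)
              | some me => me)) with
         | none => acc
         | some (first_note_idx, first_note_pitch) =>
           if last_note_pitch = first_note_pitch then
             if ((PySem.List.pyRange last_note_idx (i:Int)).any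
                 (fun j => PySem.List.pyGetD ts j "" == "tie_start")) = true then acc
             else acc ++ [(last_note_idx, "tie_start")] ++ [(first_note_idx, "tie_end")]
           else acc)
    = pvBody ts acc (i:Int) := by
  simp only [pvBody, Int.toNat_natCast]
  rw [A_lastScan ts i]
  by_cases hPL : pvLast (pvMS ts) i < pvLast (pvNote ts) i
  · rw [if_pos hPL]
    simp only []
    have hL0 : 0 ≤ pvLast (pvNote ts) i := by
      have := pvLast_ge (pvMS ts) i; omega
    rw [if_neg (show ¬ (pvLast (pvNote ts) i < 0 ∨ pvLast (pvNote ts) i < pvLast (pvMS ts) i)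
      by omega)]
    rw [A_findGt (pvMS ts) ts.length (i:Int) (by positivity)]
    simp only [Int.toNat_natCast]
    by_cases hm2 : pvNxt (pvMS ts) ts.length (i+1) < ts.length
    · rw [if_pos hm2]
      simp only []
      rw [if_neg (show ¬ ts.length ≤ pvNxt (pvMS ts) ts.length (i+1) by omega)]
      rw [A_findGt (pvME ts) ts.length ((pvNxt (pvMS ts) ts.length (i+1) : Nat) : Int)
        (by positivity)]
      simp only [Int.toNat_natCast]
      rw [show (match (if pvNxt (pvME ts) ts.length (pvNxt (pvMS ts) ts.length (i+1) + 1) < ts.length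
              then some ((pvNxt (pvME ts) ts.length (pvNxt (pvMS ts) ts.length (i+1) + 1) : Nat) : Int)
              else none) with
            | none => ((ts.length : Nat) : Int)
            | some me => me)
          = ((pvNxt (pvME ts) ts.length (pvNxt (pvMS ts) ts.length (i+1) + 1) : Nat) : Int) from by
        by_cases h : pvNxt (pvME ts) ts.length (pvNxt (pvMS ts) ts.length (i+1) + 1) < ts.length
        · rw [if_pos h]
        · rw [if_neg h]
          have h2 := pvNxt_le (pvME ts) ts.length (pvNxt (pvMS ts) ts.length (i+1) + 1)
          have h3 : pvNxt (pvME ts) ts.length (pvNxt (pvMS ts) ts.length (i+1) + 1) = ts.length := by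
            omega
          rw [h3]]
      rw [show ((pvNxt (pvMS ts) ts.length (i+1) : Nat) : Int) + 1
          = ((pvNxt (pvMS ts) ts.length (i+1) + 1 : Nat) : Int) from by push_cast; ring]
      rw [A_firstScan ts (pvNxt (pvME ts) ts.length (pvNxt (pvMS ts) ts.length (i+1) + 1))
        (pvNxt (pvMS ts) ts.length (i+1) + 1)
        (pvNxt (pvME ts) ts.length (pvNxt (pvMS ts) ts.length (i+1) + 1)) (by omega)]
      rw [pvNxt_restrict (pvNote ts)
        (pvNxt_le (pvME ts) ts.length (pvNxt (pvMS ts) ts.length (i+1) + 1))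
        (pvNxt (pvMS ts) ts.length (i+1) + 1)]
      by_cases hK : pvNxt (pvNote ts) ts.length (pvNxt (pvMS ts) ts.length (i+1) + 1)
          < pvNxt (pvME ts) ts.length (pvNxt (pvMS ts) ts.length (i+1) + 1)
      · rw [if_pos hK, if_pos hK]
        simp only []
        rw [if_neg (show ¬ pvNxt (pvME ts) ts.length (pvNxt (pvMS ts) ts.length (i+1) + 1)
            ≤ pvNxt (pvNote ts) ts.length (pvNxt (pvMS ts) ts.length (i+1) + 1) by omega)]
        have hLlt := pvLast_lt (pvNote ts) i
        rw [show PySem.List.pyRange (pvLast (pvNote ts) i) (i:Int)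
            = PySem.List.pyRange (((pvLast (pvNote ts) i).toNat : Nat) : Int) (i:Int) from by
          congr 1; omega]
        rw [A_any ts (pvLast (pvNote ts) i).toNat i (by omega)]
        by_cases hpitch : ts.getD (pvLast (pvNote ts) i).toNat ""
            = ts.getD (pvNxt (pvNote ts) ts.length (pvNxt (pvMS ts) ts.length (i+1) + 1)) ""
        · rw [if_pos hpitch]
          by_cases htie : pvTP ts i = pvTP ts (pvLast (pvNote ts) i).toNat
          · rw [if_neg (show ¬ (decide (¬ pvTP ts i = pvTP ts (pvLast (pvNote ts) i).toNat) = true)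
              by simp [htie])]
            rw [if_pos ⟨hpitch, htie⟩]
          · rw [if_pos (show decide (¬ pvTP ts i = pvTP ts (pvLast (pvNote ts) i).toNat) = true
              by simp [htie])]
            rw [if_neg (show ¬ (_ ∧ _) from fun h => htie h.2)]
        · rw [if_neg hpitch]
          rw [if_neg (show ¬ (_ ∧ _) from fun h => hpitch h.1)]
      · rw [if_neg hK, if_neg (lt_irrefl _)]
        simp only []
        rw [if_pos (show pvNxt (pvME ts) ts.length (pvNxt (pvMS ts) ts.length (i+1) + 1)
            ≤ pvNxt (pvNote ts) ts.length (pvNxt (pvMS ts) ts.length (i+1) + 1) by omega)]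
    · rw [if_neg hm2]
      simp only []
      rw [if_pos (show ts.length ≤ pvNxt (pvMS ts) ts.length (i+1) by omega)]
  · rw [if_neg hPL]
    simp only []
    by_cases hL0 : pvLast (pvNote ts) i < 0
    · rw [if_pos (Or.inl hL0)]
    · have hne : ¬ pvLast (pvNote ts) i = pvLast (pvMS ts) i := by
        intro hEq
        have h1 := pvLast_spec (pvNote ts) i (by omega)
        have h3 := pvLast_spec (pvMS ts) i (by omega)
        rw [← hEq] at h3
        generalize hLg : pvLast (pvNote ts) i = L at h1 h3
        simp only [pvNote] at h1
        simp only [pvMS] at h3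
        have hms : ts.getD L.toNat "" = "<measure_start>" := by simpa using h3
        rw [hms] at h1
        rw [show PySem.Str.startswith "<measure_start>" "note-" = false from by decide] at h1
        simp at h1
      rw [if_pos (Or.inr (by omega))]

theorem bodyB_pv (ts : List String) (acc : List (Int × String)) (i : Nat) (hin : i < ts.length) :
    (if PySem.List.pyGetD (List.map (pvLast (pvNote ts)) (List.range (ts.length + 1))) (i:Int) 0 < 0 ∨
        PySem.List.pyGetD (List.map (pvLast (pvNote ts)) (List.range (ts.length + 1))) (i:Int) 0 <
          PySem.List.pyGetD (List.map (pvLast (pvMS ts)) (List.range (ts.length + 1))) (i:Int) 0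
     then acc
     else
      if (ts.length : Int) ≤
          PySem.List.pyGetD (List.map (fun k => (pvNxt (pvMS ts) ts.length k : Int))
            (List.range (ts.length + 1))) ((i:Int) + 1) 0 then acc
      else
       if PySem.List.pyGetD (List.map (fun k => (pvNxt (pvME ts) ts.length k : Int))
            (List.range (ts.length + 1)))
            (PySem.List.pyGetD (List.map (fun k => (pvNxt (pvMS ts) ts.length k : Int))
              (List.range (ts.length + 1))) ((i:Int) + 1) 0 + 1) 0 ≤
          PySem.List.pyGetD (List.map (fun k => (pvNxt (pvNote ts) ts.length k : Int))
            (List.range (ts.length + 1)))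
            (PySem.List.pyGetD (List.map (fun k => (pvNxt (pvMS ts) ts.length k : Int))
              (List.range (ts.length + 1))) ((i:Int) + 1) 0 + 1) 0 then acc
       else
        if PySem.List.pyGetD ts
              (PySem.List.pyGetD (List.map (pvLast (pvNote ts)) (List.range (ts.length + 1))) (i:Int) 0) "" =
            PySem.List.pyGetD ts
              (PySem.List.pyGetD (List.map (fun k => (pvNxt (pvNote ts) ts.length k : Int))
                (List.range (ts.length + 1)))
                (PySem.List.pyGetD (List.map (fun k => (pvNxt (pvMS ts) ts.length k : Int))
                  (List.range (ts.length + 1))) ((i:Int) + 1) 0 + 1) 0) "" ∧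
           PySem.List.pyGetD (List.map (pvTP ts) (List.range (ts.length + 1))) (i:Int) 0 =
            PySem.List.pyGetD (List.map (pvTP ts) (List.range (ts.length + 1)))
              (PySem.List.pyGetD (List.map (pvLast (pvNote ts)) (List.range (ts.length + 1))) (i:Int) 0) 0
        then
          acc ++ [(PySem.List.pyGetD (List.map (pvLast (pvNote ts)) (List.range (ts.length + 1))) (i:Int) 0,
                   "tie_start")] ++
            [(PySem.List.pyGetD (List.map (fun k => (pvNxt (pvNote ts) ts.length k : Int))
                (List.range (ts.length + 1)))
                (PySem.List.pyGetD (List.map (fun k => (pvNxt (pvMS ts) ts.length k : Int))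
                  (List.range (ts.length + 1))) ((i:Int) + 1) 0 + 1) 0, "tie_end")]
        else acc)
    = pvBody ts acc (i:Int) := by
  have eL : PySem.List.pyGetD (List.map (pvLast (pvNote ts)) (List.range (ts.length + 1))) (i:Int) 0
      = pvLast (pvNote ts) i := by
    rw [PySem.List.pyGetD_natCast, PySem.List.getD_map_range _ _ _ _ (by omega)]
  have eP : PySem.List.pyGetD (List.map (pvLast (pvMS ts)) (List.range (ts.length + 1))) (i:Int) 0
      = pvLast (pvMS ts) i := by
    rw [PySem.List.pyGetD_natCast, PySem.List.getD_map_range _ _ _ _ (by omega)]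
  have ecast : ((i:Int) + 1) = ((i+1 : Nat) : Int) := by push_cast; ring
  have eM2 : PySem.List.pyGetD (List.map (fun k => (pvNxt (pvMS ts) ts.length k : Int))
      (List.range (ts.length + 1))) (((i+1 : Nat)) : Int) 0
      = ((pvNxt (pvMS ts) ts.length (i+1) : Nat) : Int) := by
    rw [PySem.List.pyGetD_natCast, PySem.List.getD_map_range _ _ _ _ (by omega)]
  have eTP1 : PySem.List.pyGetD (List.map (pvTP ts) (List.range (ts.length + 1))) (i:Int) 0
      = pvTP ts i := by
    rw [PySem.List.pyGetD_natCast, PySem.List.getD_map_range _ _ _ _ (by omega)]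
  rw [eL, eP, ecast, eM2, eTP1]
  simp only [pvBody, Int.toNat_natCast]
  by_cases hc1 : pvLast (pvNote ts) i < 0 ∨ pvLast (pvNote ts) i < pvLast (pvMS ts) i
  · rw [if_pos hc1, if_pos hc1]
  · rw [if_neg hc1, if_neg hc1]
    have hL0 : 0 ≤ pvLast (pvNote ts) i := by omega
    by_cases hc2 : ts.length ≤ pvNxt (pvMS ts) ts.length (i+1)
    · rw [if_pos (show (ts.length : Int) ≤ ((pvNxt (pvMS ts) ts.length (i+1) : Nat) : Int)
        by exact_mod_cast hc2), if_pos hc2]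
    · rw [if_neg (show ¬ (ts.length : Int) ≤ ((pvNxt (pvMS ts) ts.length (i+1) : Nat) : Int)
        by exact_mod_cast hc2), if_neg hc2]
      have hm2lt : pvNxt (pvMS ts) ts.length (i+1) < ts.length := by omega
      have ecast2 : ((pvNxt (pvMS ts) ts.length (i+1) : Nat) : Int) + 1
          = ((pvNxt (pvMS ts) ts.length (i+1) + 1 : Nat) : Int) := by push_cast; ring
      have eM2e : PySem.List.pyGetD (List.map (fun k => (pvNxt (pvME ts) ts.length k : Int))
          (List.range (ts.length + 1))) (((pvNxt (pvMS ts) ts.length (i+1) + 1 : Nat)) : Int) 0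
          = ((pvNxt (pvME ts) ts.length (pvNxt (pvMS ts) ts.length (i+1) + 1) : Nat) : Int) := by
        rw [PySem.List.pyGetD_natCast, PySem.List.getD_map_range _ _ _ _ (by omega)]
      have eK : PySem.List.pyGetD (List.map (fun k => (pvNxt (pvNote ts) ts.length k : Int))
          (List.range (ts.length + 1))) (((pvNxt (pvMS ts) ts.length (i+1) + 1 : Nat)) : Int) 0
          = ((pvNxt (pvNote ts) ts.length (pvNxt (pvMS ts) ts.length (i+1) + 1) : Nat) : Int) := by
        rw [PySem.List.pyGetD_natCast, PySem.List.getD_map_range _ _ _ _ (by omega)]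
      rw [ecast2, eM2e, eK]
      have eLpg : PySem.List.pyGetD ts (pvLast (pvNote ts) i) "" = ts.getD (pvLast (pvNote ts) i).toNat "" := by
        conv_lhs => rw [show pvLast (pvNote ts) i = (((pvLast (pvNote ts) i).toNat : Nat) : Int)
          from by omega]
        rw [PySem.List.pyGetD_natCast]
      have eKpg : PySem.List.pyGetD ts
          (((pvNxt (pvNote ts) ts.length (pvNxt (pvMS ts) ts.length (i+1) + 1) : Nat)) : Int) ""
          = ts.getD (pvNxt (pvNote ts) ts.length (pvNxt (pvMS ts) ts.length (i+1) + 1)) "" := by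
        rw [PySem.List.pyGetD_natCast]
      have hLlt := pvLast_lt (pvNote ts) i
      have eTP2 : PySem.List.pyGetD (List.map (pvTP ts) (List.range (ts.length + 1)))
          (pvLast (pvNote ts) i) 0 = pvTP ts (pvLast (pvNote ts) i).toNat := by
        conv_lhs => rw [show pvLast (pvNote ts) i = (((pvLast (pvNote ts) i).toNat : Nat) : Int)
          from by omega]
        rw [PySem.List.pyGetD_natCast, PySem.List.getD_map_range _ _ _ _ (by omega)]
      rw [eLpg, eKpg, eTP2]
      by_cases hc3 : pvNxt (pvME ts) ts.length (pvNxt (pvMS ts) ts.length (i+1) + 1)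
          ≤ pvNxt (pvNote ts) ts.length (pvNxt (pvMS ts) ts.length (i+1) + 1)
      · have hcast3 : ((pvNxt (pvME ts) ts.length (pvNxt (pvMS ts) ts.length (i+1) + 1) : Nat) : Int)
            ≤ ((pvNxt (pvNote ts) ts.length (pvNxt (pvMS ts) ts.length (i+1) + 1) : Nat) : Int) := by
          exact_mod_cast hc3
        rw [if_pos hcast3, if_pos hc3]
      · rw [if_neg (show ¬ ((pvNxt (pvME ts) ts.length (pvNxt (pvMS ts) ts.length (i+1) + 1) : Nat) : Int)
            ≤ ((pvNxt (pvNote ts) ts.length (pvNxt (pvMS ts) ts.length (i+1) + 1) : Nat) : Int)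
          by exact_mod_cast hc3), if_neg hc3]

-- ===== VERDICT (by name: the statement is the Claim_ definition above) =====
theorem insert_ties_py_spec : Claim_equal_insert_ties_py := by
  intro ts hdom
  unfold Spec_insert_ties_py
  show insert_ties_py ts = insert_ties_py_alt ts
  unfold insert_ties_py insert_ties_py_alt
  simp only [A_bounds, B_scan1, PySem.List.len_eq]
  by_cases hg : (pvIdx (pvMS ts) ts.length).length < 2 ∨ (pvIdx (pvME ts) ts.length).length < 2
  · simp only [if_pos hg]
  · rw [if_neg hg, if_neg hg]
    rw [PySem.List.foldl_prod_mk
      (f := fun acc (p : Int × String) =>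
        acc ++ [if p.2 = "<measure_start>" then p.1 else PySem.List.pyGetD acc (-1) 0])
      (g := fun acc (p : Int × String) =>
        acc ++ [if PySem.List.pyGetD (List.map (pvNote ts) (List.range ts.length)) p.1 false = true
                then p.1 else PySem.List.pyGetD acc (-1) 0])]
    rw [B_prev (fun q : Int × String => q.2 = "<measure_start>") (pvMS ts) ts
      (fun i hi => by unfold pvMS; rfl)]
    rw [B_prev (fun q : Int × String =>
        PySem.List.pyGetD (List.map (pvNote ts) (List.range ts.length)) q.1 false = true)
      (pvNote ts) ts
      (fun i hi => by
        simp only [PySem.List.pyGetD_natCast]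
        rw [PySem.List.getD_map_range _ _ _ _ hi]
        simp)]
    rw [PySem.List.foldl_prod_mk
      (f := fun acc (i : Int) =>
        acc ++ [if PySem.List.pyGetD ts i "" = "<measure_start>" then i
                else PySem.List.pyGetD acc (-1) 0])
      (g := fun (st : List Int × List Int) (i : Int) =>
        (st.1 ++ [if PySem.List.pyGetD ts i "" = "<measure_end>" then i
                  else PySem.List.pyGetD st.1 (-1) 0],
         st.2 ++ [if PySem.List.pyGetD (List.map (pvNote ts) (List.range ts.length)) i false = true
                  then i else PySem.List.pyGetD st.2 (-1) 0]))]
    rw [PySem.List.foldl_prod_mk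
      (f := fun acc (i : Int) =>
        acc ++ [if PySem.List.pyGetD ts i "" = "<measure_end>" then i
                else PySem.List.pyGetD acc (-1) 0])
      (g := fun acc (i : Int) =>
        acc ++ [if PySem.List.pyGetD (List.map (pvNote ts) (List.range ts.length)) i false = true
                then i else PySem.List.pyGetD acc (-1) 0])]
    rw [B_next (fun j : Int => PySem.List.pyGetD ts j "" = "<measure_start>") (pvMS ts) ts.length
      (fun i hi => by unfold pvMS; simp only [PySem.List.pyGetD_natCast])]
    rw [B_next (fun j : Int => PySem.List.pyGetD ts j "" = "<measure_end>") (pvME ts) ts.length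
      (fun i hi => by unfold pvME; simp only [PySem.List.pyGetD_natCast])]
    rw [B_next (fun j : Int =>
        PySem.List.pyGetD (List.map (pvNote ts) (List.range ts.length)) j false = true)
      (pvNote ts) ts.length
      (fun i hi => by
        simp only [PySem.List.pyGetD_natCast]
        rw [PySem.List.getD_map_range _ _ _ _ hi]
        simp)]
    rw [PySem.List.slice_to_neg_one]
    have hME2 : 2 ≤ (pvIdx (pvME ts) ts.length).length := by
      push_neg at hg; omega
    have hmemME : ∀ x ∈ (pvIdx (pvME ts) ts.length).dropLast,
        ∃ i : Nat, i < ts.length ∧ x = (i : Int) := by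
      intro x hx
      have hx' := (List.dropLast_sublist (pvIdx (pvME ts) ts.length)).subset hx
      obtain ⟨i, hi, _, rfl⟩ := mem_pvIdx.mp hx'
      exact ⟨i, hi, rfl⟩
    have heqA : List.foldl
        (fun ins m_idx =>
          match pvLastNoteScan ts
              (PySem.List.pyRange (PySem.List.pyGetD (pvIdx (pvME ts) ts.length) m_idx 0 - 1) (-1) (-1)) with
          | none => ins
          | some (last_note_idx, last_note_pitch) =>
            match List.find? (fun ms => decide (PySem.List.pyGetD (pvIdx (pvME ts) ts.length) m_idx 0 < ms))
                (pvIdx (pvMS ts) ts.length) with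
            | none => ins
            | some m2_start =>
              match pvFirstNoteScan ts
                  (PySem.List.pyRange (m2_start + 1)
                    (match List.find? (fun me => decide (m2_start < me)) (pvIdx (pvME ts) ts.length) with
                     | none => ((ts.length : Nat) : Int)
                     | some me => me)) with
              | none => ins
              | some (first_note_idx, first_note_pitch) =>
                if last_note_pitch = first_note_pitch then
                  if ((PySem.List.pyRange last_note_idx
                        (PySem.List.pyGetD (pvIdx (pvME ts) ts.length) m_idx 0)).any
                      fun j => PySem.List.pyGetD ts j "" == "tie_start") = true then ins
                  else ins ++ [(last_note_idx, "tie_start")] ++ [(first_note_idx, "tie_end")]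
                else ins)
        [] (PySem.List.pyRange 0 ((((pvIdx (pvME ts) ts.length).length : Nat) : Int) - 1))
      = List.foldl (fun acc x => pvBody ts acc
          (PySem.List.pyGetD ((pvIdx (pvME ts) ts.length).dropLast) x 0))
        [] (PySem.List.pyRange 0 ((((pvIdx (pvME ts) ts.length).length : Nat) : Int) - 1)) := by
      refine PySem.List.foldl_congr_mem _ _ _ _ ?_
      intro acc x hx
      obtain ⟨h0x, h1x⟩ := PySem.List.mem_pyRange_one.mp hx
      have hdl : (pvIdx (pvME ts) ts.length).dropLast.length
          = (pvIdx (pvME ts) ts.length).length - 1 := List.length_dropLast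
      have hgd : PySem.List.pyGetD (pvIdx (pvME ts) ts.length) x 0
          = PySem.List.pyGetD ((pvIdx (pvME ts) ts.length).dropLast) x 0 := by
        rw [PySem.List.pyGetD_eq_getElem _ 0 h0x (by push_cast; omega),
            PySem.List.pyGetD_eq_getElem _ 0 h0x (by rw [hdl]; push_cast; omega)]
        simp [List.getElem_dropLast]
      rw [hgd]
      have hmem : PySem.List.pyGetD ((pvIdx (pvME ts) ts.length).dropLast) x 0
          ∈ (pvIdx (pvME ts) ts.length).dropLast := by
        rw [PySem.List.pyGetD_eq_getElem _ 0 h0x (by rw [hdl]; push_cast; omega)]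
        exact List.getElem_mem _
      obtain ⟨i, hi, hxi⟩ := hmemME _ hmem
      rw [hxi]
      exact bodyA_pv ts acc i hi
    rw [heqA]
    have hlen1 : ((((pvIdx (pvME ts) ts.length).length : Nat) : Int) - 1)
        = (((pvIdx (pvME ts) ts.length).dropLast.length : Nat) : Int) := by
      rw [List.length_dropLast]; push_cast; omega
    rw [hlen1, foldl_idx ((pvIdx (pvME ts) ts.length).dropLast) (pvBody ts) []]
    have heqB : List.foldl
        (fun ins m1_end =>
          if PySem.List.pyGetD (List.map (pvLast (pvMS ts)) (List.range (ts.length + 1)),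
                List.map (pvLast (pvNote ts)) (List.range (ts.length + 1))).2 m1_end 0 < 0 ∨
              PySem.List.pyGetD (List.map (pvLast (pvMS ts)) (List.range (ts.length + 1)),
                List.map (pvLast (pvNote ts)) (List.range (ts.length + 1))).2 m1_end 0 <
                PySem.List.pyGetD (List.map (pvLast (pvMS ts)) (List.range (ts.length + 1)),
                  List.map (pvLast (pvNote ts)) (List.range (ts.length + 1))).1 m1_end 0 then ins
          else
            if (ts.length : Int) ≤
                PySem.List.pyGetD (List.map (fun k => (pvNxt (pvMS ts) ts.length k : Int))
                  (List.range (ts.length + 1))) (m1_end + 1) 0 then ins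
            else
              if PySem.List.pyGetD (List.map (fun k => (pvNxt (pvME ts) ts.length k : Int))
                    (List.range (ts.length + 1)))
                    (PySem.List.pyGetD (List.map (fun k => (pvNxt (pvMS ts) ts.length k : Int))
                      (List.range (ts.length + 1))) (m1_end + 1) 0 + 1) 0 ≤
                  PySem.List.pyGetD (List.map (fun k => (pvNxt (pvNote ts) ts.length k : Int))
                    (List.range (ts.length + 1)))
                    (PySem.List.pyGetD (List.map (fun k => (pvNxt (pvMS ts) ts.length k : Int))
                      (List.range (ts.length + 1))) (m1_end + 1) 0 + 1) 0 then ins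
              else
                if PySem.List.pyGetD ts
                      (PySem.List.pyGetD (List.map (pvLast (pvMS ts)) (List.range (ts.length + 1)),
                        List.map (pvLast (pvNote ts)) (List.range (ts.length + 1))).2 m1_end 0) "" =
                    PySem.List.pyGetD ts
                      (PySem.List.pyGetD (List.map (fun k => (pvNxt (pvNote ts) ts.length k : Int))
                        (List.range (ts.length + 1)))
                        (PySem.List.pyGetD (List.map (fun k => (pvNxt (pvMS ts) ts.length k : Int))
                          (List.range (ts.length + 1))) (m1_end + 1) 0 + 1) 0) "" ∧
                    PySem.List.pyGetD (List.map (pvTP ts) (List.range (ts.length + 1))) m1_end 0 =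
                      PySem.List.pyGetD (List.map (pvTP ts) (List.range (ts.length + 1)))
                        (PySem.List.pyGetD (List.map (pvLast (pvMS ts)) (List.range (ts.length + 1)),
                          List.map (pvLast (pvNote ts)) (List.range (ts.length + 1))).2 m1_end 0) 0 then
                  ins ++
                      [(PySem.List.pyGetD (List.map (pvLast (pvMS ts)) (List.range (ts.length + 1)),
                          List.map (pvLast (pvNote ts)) (List.range (ts.length + 1))).2 m1_end 0,
                        "tie_start")] ++
                    [(PySem.List.pyGetD (List.map (fun k => (pvNxt (pvNote ts) ts.length k : Int))
                        (List.range (ts.length + 1)))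
                        (PySem.List.pyGetD (List.map (fun k => (pvNxt (pvMS ts) ts.length k : Int))
                          (List.range (ts.length + 1))) (m1_end + 1) 0 + 1) 0, "tie_end")]
                else ins)
        [] ((pvIdx (pvME ts) ts.length).dropLast)
      = List.foldl (pvBody ts) [] ((pvIdx (pvME ts) ts.length).dropLast) := by
      refine PySem.List.foldl_congr_mem _ _ _ _ ?_
      intro acc x hx
      obtain ⟨i, hi, rfl⟩ := hmemME x hx
      exact bodyB_pv ts acc i hi
    rw [heqB]
    rw [M_rev]
    refine M_merge _ ts (PySem.List.sorted_pairwise _ _) ?_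
    intro p hp
    have hpmem : p ∈ ((pvIdx (pvME ts) ts.length).dropLast).foldl (pvBody ts) [] :=
      (PySem.List.sorted_perm _ _ _).mem_iff.mp hp
    refine pvBody_bound ts _ [] (by simp) ?_ p hpmem
    intro e he
    obtain ⟨i, hi, rfl⟩ := hmemME e he
    constructor
    · positivity
    · exact_mod_cast hi
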